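-- pv_equiv track=rewrite | github.com/lkyin/ASFI-Project-Explorer-APE- | code/generate_networks.py | dealising_old
-- ===== SOURCE A (Python) =====
-- def dealising_old(s1, s2):
--
--     s1, s2 = s1.lower(), s2.lower()
--     #l1, l2 = len(s1), len(s2)
--
--     '''
--     if l1 == l2:
--         if s1 == s2 or (s1.replace('.', ' ') == s2) or (s2.replace('.', ' ') == s1):
--             return True
--         return False
--     '''
--
--     #if l1 - l2 == -1:
--     for i in range(len(s2)):
--         if s1 == s2[:i] + s2[i+1:]:
--             return True
--     return False
--
--     '''
--
--     if l1 - l2 == 1: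
--         for i in range(l1):
--             if s2 == s1[:i] + s1[i+1:]:
--                 return True
--         return False
--     '''
-- ===== SOURCE B (Python) =====
-- def dealising_old(s1, s2):
--     a, b = s1.lower(), s2.lower()
--     if len(b) != len(a) + 1:
--         return False
--     i = 0
--     while i < len(a) and a[i] == b[i]:
--         i += 1
--     return a[i:] == b[i + 1:]
-- ===== Notes on version B (the rewrite author's own statement) =====
-- stated objective: faster
-- what changed: Replaces the try-every-deletion-position loop (rebuilding and comparing a full candidate string per index) with a length check plus a single two-pointer scan: advance over the common prefix and compare the remaining suffixes once.
import Mathlib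
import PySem

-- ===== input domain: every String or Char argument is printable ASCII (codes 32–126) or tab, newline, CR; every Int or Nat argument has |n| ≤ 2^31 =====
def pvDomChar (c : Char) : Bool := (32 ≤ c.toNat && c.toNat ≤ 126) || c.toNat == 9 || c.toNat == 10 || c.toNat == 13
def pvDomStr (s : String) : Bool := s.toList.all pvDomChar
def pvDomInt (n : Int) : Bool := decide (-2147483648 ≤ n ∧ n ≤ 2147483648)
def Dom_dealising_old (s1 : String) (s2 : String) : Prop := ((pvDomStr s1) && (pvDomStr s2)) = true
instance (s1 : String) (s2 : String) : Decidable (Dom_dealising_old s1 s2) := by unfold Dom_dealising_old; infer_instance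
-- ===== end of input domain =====

-- B replaces A's try-every-deletion-position scan by a length check plus one two-pointer
-- pass over the common prefix (objective: faster by algorithm change).

-- ===== PORT A =====
-- for i in range(len(s2)): if s1 == s2[:i] + s2[i+1:]: return True / return False
def dealising_old (s1 : String) (s2 : String) : Bool :=
  (PySem.List.pyRange 0 ((PySem.Chars.lower s2.toList).length : Int) 1).any (fun i =>
    decide (PySem.Chars.lower s1.toList
      = PySem.List.slice (PySem.Chars.lower s2.toList) none (some i)
        ++ PySem.List.slice (PySem.Chars.lower s2.toList) (some (i + 1)) none))

-- ===== PORT B =====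
-- the while-loop of Source B: advance while the heads agree, then compare remainders
-- (at the mismatch a[i:] is x :: xs and b[i+1:] is ys; with a exhausted, a[i:] = [] and b[i+1:] = b-remainder.drop 1)
def pvTwoPtr : List Char → List Char → Bool
  | x :: xs, y :: ys => if x = y then pvTwoPtr xs ys else decide ((x :: xs) = ys)
  | [], b => decide (([] : List Char) = b.drop 1)
  | _ :: _, [] => false

def dealising_old_alt (s1 : String) (s2 : String) : Bool :=
  if (PySem.Chars.lower s2.toList).length = (PySem.Chars.lower s1.toList).length + 1 then
    pvTwoPtr (PySem.Chars.lower s1.toList) (PySem.Chars.lower s2.toList)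
  else false

-- ===== PRECONDITION & SPEC =====
def Spec_dealising_old (s1 : String) (s2 : String) (out : Bool) : Prop := out = dealising_old_alt s1 s2
instance (s1 : String) (s2 : String) (out : Bool) : Decidable (Spec_dealising_old s1 s2 out) := by unfold Spec_dealising_old; infer_instance

-- ===== CLAIM (what is proved, stated in full; the proofs are below) =====
def Claim_equal_dealising_old : Prop := ∀ (s1 : String) (s2 : String), Dom_dealising_old s1 s2 → Spec_dealising_old s1 s2 (dealising_old s1 s2)

-- ===== LEMMAS AND PROOFS =====

-- A's loop, restated over Nat indices
def pvNatAny (a b : List Char) : Bool :=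
  (List.range b.length).any (fun i => decide (a = b.take i ++ b.drop (i + 1)))

lemma portA_eq_natAny (s1 s2 : String) :
    dealising_old s1 s2
      = pvNatAny (PySem.Chars.lower s1.toList) (PySem.Chars.lower s2.toList) := by
  unfold dealising_old pvNatAny
  rw [PySem.List.pyRange_one]
  simp only [List.any_map, Int.sub_zero, Int.toNat_natCast, Function.comp_def, zero_add]
  congr 1
  funext i
  have h1 : PySem.List.slice (PySem.Chars.lower s2.toList) none (some (i : Int))
      = (PySem.Chars.lower s2.toList).take i := PySem.List.slice_to_natCast _ _
  have h2 : PySem.List.slice (PySem.Chars.lower s2.toList) (some ((i : Int) + 1)) none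
      = (PySem.Chars.lower s2.toList).drop (i + 1) := by
    have : ((i : Int) + 1) = ((i + 1 : Nat) : Int) := by push_cast; ring
    rw [this, PySem.List.slice_from_natCast]
  rw [h1, h2]

-- a deleted-one-character candidate always has length (len b) - 1
lemma natAny_false_of_length (a b : List Char) (h : b.length ≠ a.length + 1) :
    pvNatAny a b = false := by
  unfold pvNatAny
  rw [List.any_eq_false]
  intro i hi
  simp only [List.mem_range] at hi
  simp only [decide_eq_true_eq]
  intro hc
  have := congrArg List.length hc
  simp only [List.length_append, List.length_take, List.length_drop] at this
  omega

-- structural step of A's loop on a cons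
lemma natAny_cons (a : List Char) (y : Char) (ys : List Char) :
    pvNatAny a (y :: ys)
      = (decide (a = ys) ||
          (match a with
           | [] => false
           | x :: xs => decide (x = y) && pvNatAny xs ys)) := by
  unfold pvNatAny
  simp only [List.length_cons, List.range_succ_eq_map, List.any_cons, List.any_map,
    Function.comp_def, List.take_zero, List.drop_succ_cons, List.drop_zero, List.nil_append,
    List.take_succ_cons]
  congr 1
  cases a with
  | nil => simp
  | cons x xs =>
    by_cases hxy : x = y
    · subst hxy
      simp
    · simp [hxy]

-- deleting the head of c :: a recovers a
lemma twoPtr_cons_self : ∀ (a : List Char) (c : Char), pvTwoPtr a (c :: a) = true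
  | [], c => by simp [pvTwoPtr]
  | x :: xs, c => by
    simp only [pvTwoPtr]
    split_ifs with h
    · exact twoPtr_cons_self xs x
    · simp

-- the two loops agree when the lengths fit
lemma natAny_eq_twoPtr : ∀ (b a : List Char), b.length = a.length + 1 →
    pvNatAny a b = pvTwoPtr a b := by
  intro b
  induction b with
  | nil => intro a h; simp at h
  | cons y ys ih =>
    intro a h
    rw [natAny_cons]
    cases a with
    | nil =>
      have hys : ys = [] := by
        simp only [List.length_cons, List.length_nil] at h
        exact List.length_eq_zero_iff.mp (by omega)
      subst hys
      simp [pvTwoPtr]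
    | cons x xs =>
      have hlen : ys.length = xs.length + 1 := by
        simp only [List.length_cons] at h; omega
      show (decide (x :: xs = ys) || (decide (x = y) && pvNatAny xs ys))
          = (if x = y then pvTwoPtr xs ys else decide (x :: xs = ys))
      split_ifs with hxy
      · subst hxy
        rw [ih xs hlen]
        simp only [decide_true, Bool.true_and]
        cases hc : decide (x :: xs = ys) with
        | false => simp
        | true =>
          have : ys = x :: xs := (of_decide_eq_true hc).symm
          subst this
          simp [twoPtr_cons_self]
      · simp [hxy]

-- ===== VERDICT (by name: the statement is the Claim_ definition above) =====
theorem dealising_old_spec : Claim_equal_dealising_old := by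
  unfold Claim_equal_dealising_old
  intro s1 s2 _
  unfold Spec_dealising_old
  rw [portA_eq_natAny]
  unfold dealising_old_alt
  split_ifs with h
  · exact natAny_eq_twoPtr _ _ h
  · exact natAny_false_of_length _ _ h
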